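-- pv_equiv track=rewrite | github.com/Amin-Mohamed1/ConnectFourGame | BackEnd/Services/Heuristic.py | connected_threes_diagonal
-- ===== SOURCE A (Python) =====
-- def connected_threes_diagonal(board: list[list[str]], piece: str) -> int:
--     score: int = 0
--     for row in range(len(board)):
--         for col in range(len(board[0])):
--             if board[row][col] == piece:
--                 if (row + 3 < len(board) and col + 3 < len(board[0])) and (board[row + 1][col + 1] == piece) and \
--                         board[row + 2][col + 2] == piece and board[row + 3][col + 3] == '':
--                     score += 1
--                 if (row + 3 < len(board) and col - 3 >= 0) and (board[row + 1][col - 1] == piece) and board[row + 2][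
--                     col - 2] == piece and board[row + 3][col - 3] == '':
--                     score += 1
--     return score
-- ===== SOURCE B (Python) =====
-- def connected_threes_diagonal(board: list[list[str]], piece: str) -> int:
--     # Different decomposition: materialise each diagonal line of the board
--     # (down-right lines and anti-diagonal lines, both keyed by k in
--     # range(R+C-1) and ordered by increasing row), then count the sliding
--     # 4-windows equal to [piece, piece, piece, ''] within each line.
--     if not board:
--         return 0
--     R, C = len(board), len(board[0])
--     target = [piece, piece, piece, '']
--     score = 0
--     for k in range(R + C - 1):
--         lo, hi = max(k - C + 1, 0), min(R, k + 1)
--         down = [board[r][r - k + C - 1] for r in range(lo, hi)]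
--         anti = [board[r][k - r] for r in range(lo, hi)]
--         for seq in (down, anti):
--             for i in range(len(seq) - 3):
--                 if seq[i:i + 4] == target:
--                     score += 1
--     return score
-- ===== Notes on version B (the rewrite author's own statement) =====
-- stated objective: alternative
-- what changed: B first materialises every diagonal line of the board (down-right and anti-diagonal lines, keyed by k in range(R+C-1) and ordered by increasing row) as an explicit list, and then counts sliding 4-cell windows equal to [piece, piece, piece, ''] inside each line; A instead probes bounds-checked index offsets from every grid cell.
import Mathlib
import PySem

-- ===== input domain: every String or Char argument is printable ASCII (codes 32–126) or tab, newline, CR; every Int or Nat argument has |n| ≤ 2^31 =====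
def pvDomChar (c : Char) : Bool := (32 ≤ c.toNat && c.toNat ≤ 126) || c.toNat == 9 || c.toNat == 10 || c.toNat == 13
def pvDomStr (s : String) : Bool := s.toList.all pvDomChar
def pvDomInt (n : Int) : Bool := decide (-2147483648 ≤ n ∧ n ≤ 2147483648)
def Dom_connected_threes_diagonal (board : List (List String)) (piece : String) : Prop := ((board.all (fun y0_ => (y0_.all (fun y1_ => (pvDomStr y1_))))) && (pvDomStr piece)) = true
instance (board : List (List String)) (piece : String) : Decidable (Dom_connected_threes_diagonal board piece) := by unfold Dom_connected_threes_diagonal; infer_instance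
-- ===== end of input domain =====

-- B materialises every diagonal line of the board as an explicit list and counts the
-- sliding 4-windows [piece, piece, piece, ''] inside each line (objective: alternative).

-- ===== PORT A =====
-- board[r][c] as both Pythons read it; in range whenever Pre_ holds
def pvCellA (board : List (List String)) (r c : Int) : String :=
  PySem.List.pyGetD (PySem.List.pyGetD board r []) c ""

def connected_threes_diagonal (board : List (List String)) (piece : String) : Int :=
  let nrows : Int := board.length
  let ncols : Int := (PySem.List.pyGetD board 0 ([] : List String)).length
  (PySem.List.pyRange 0 nrows 1).foldl (fun score row =>
    (PySem.List.pyRange 0 ncols 1).foldl (fun score col =>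
      if pvCellA board row col = piece then
        let score := if (row + 3 < nrows ∧ col + 3 < ncols) ∧ pvCellA board (row+1) (col+1) = piece ∧
            pvCellA board (row+2) (col+2) = piece ∧ pvCellA board (row+3) (col+3) = "" then score + 1 else score
        if (row + 3 < nrows ∧ col - 3 ≥ 0) ∧ pvCellA board (row+1) (col-1) = piece ∧
            pvCellA board (row+2) (col-2) = piece ∧ pvCellA board (row+3) (col-3) = "" then score + 1 else score
      else score) score) 0

-- ===== PORT B =====
-- 'for i in range(len(seq) - 3): if seq[i:i+4] == target: score += 1'
def pvSeqCount (target : List String) (seq : List String) (score : Int) : Int :=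
  (PySem.List.pyRange 0 ((seq.length : Int) - 3) 1).foldl
    (fun s i => if PySem.List.slice seq (some i) (some (i + 4)) = target then s + 1 else s) score

def connected_threes_diagonal_alt (board : List (List String)) (piece : String) : Int :=
  match board with
  | [] => 0
  | row0 :: _ =>
    let R : Int := (board.length : Int)
    let C : Int := (row0.length : Int)
    let target : List String := [piece, piece, piece, ""]
    (PySem.List.pyRange 0 (R + C - 1) 1).foldl (fun score k =>
      let lo : Int := max (k - C + 1) 0
      let hi : Int := min R (k + 1)
      let down := (PySem.List.pyRange lo hi 1).map (fun r => pvCellA board r (r - k + C - 1))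
      let anti := (PySem.List.pyRange lo hi 1).map (fun r => pvCellA board r (k - r))
      [down, anti].foldl (fun s seq => pvSeqCount target seq s) score) 0

-- ===== PRECONDITION & SPEC =====
-- Pre_ excludes exactly the inputs where A raises IndexError: A indexes every row at all
-- columns below len(board[0]), so it returns iff every row is at least that long.
def Pre_connected_threes_diagonal (board : List (List String)) (piece : String) : Prop :=
  ∀ row ∈ board, (board.getD 0 ([] : List String)).length ≤ row.length
instance (board : List (List String)) (piece : String) : Decidable (Pre_connected_threes_diagonal board piece) := by unfold Pre_connected_threes_diagonal; infer_instance

def pvWitness_connected_threes_diagonal : List (List String) × String :=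
  ([["x", "", "", ""], ["", "x", "", ""], ["", "", "x", ""], ["", "", "", ""]], "x")

def Spec_connected_threes_diagonal (board : List (List String)) (piece : String) (out : Int) : Prop := out = connected_threes_diagonal_alt board piece
instance (board : List (List String)) (piece : String) (out : Int) : Decidable (Spec_connected_threes_diagonal board piece out) := by unfold Spec_connected_threes_diagonal; infer_instance

-- ===== CLAIM (what is proved, stated in full; the proofs are below) =====
def Claim_equal_connected_threes_diagonal : Prop := ∀ (board : List (List String)) (piece : String), Dom_connected_threes_diagonal board piece → Pre_connected_threes_diagonal board piece → Spec_connected_threes_diagonal board piece (connected_threes_diagonal board piece)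

-- ===== LEMMAS AND PROOFS =====

-- 0/1 indicator
def pvI (b : Bool) : Int := if b then 1 else 0

-- board[r][c] at Nat indices
def pvCell (board : List (List String)) (r c : Nat) : String :=
  ((board.getD r ([] : List String)).getD c "")

-- the two diagonal patterns at Nat indices (cells only; bounds live in the range)
def pvDR (board : List (List String)) (p : String) (r c : Nat) : Bool :=
  decide (pvCell board r c = p) && decide (pvCell board (r+1) (c+1) = p) && decide (pvCell board (r+2) (c+2) = p) && decide (pvCell board (r+3) (c+3) = "")
def pvDL (board : List (List String)) (p : String) (r c : Nat) : Bool :=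
  decide (pvCell board r c = p) && decide (pvCell board (r+1) (c-1) = p) && decide (pvCell board (r+2) (c-2) = p) && decide (pvCell board (r+3) (c-3) = "")

theorem pv_foldl_body_sum {α : Type} (l : List α) (f : Int → α → Int) (g : α → Int) (a : Int)
    (h : ∀ s x, f s x = s + g x) : l.foldl f a = a + (l.map g).sum := by
  have hf : f = fun s x => s + g x := funext fun s => funext fun x => h s x
  rw [hf, PySem.List.foldl_add]

set_option maxHeartbeats 1600000 in
theorem pvA_cell (board : List (List String)) (piece : String) (r c : Nat) (s : Int) :
    (if pvCellA board (r : Int) (c : Int) = piece then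
        let score := if (((r : Int) + 3 < (board.length : Int) ∧ (c : Int) + 3 < ((board.getD 0 ([] : List String)).length : Int)) ∧
            pvCellA board ((r : Int)+1) ((c : Int)+1) = piece ∧ pvCellA board ((r : Int)+2) ((c : Int)+2) = piece ∧
            pvCellA board ((r : Int)+3) ((c : Int)+3) = "") then s + 1 else s
        if (((r : Int) + 3 < (board.length : Int) ∧ (c : Int) - 3 ≥ 0) ∧
            pvCellA board ((r : Int)+1) ((c : Int)-1) = piece ∧ pvCellA board ((r : Int)+2) ((c : Int)-2) = piece ∧
            pvCellA board ((r : Int)+3) ((c : Int)-3) = "") then score + 1 else score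
      else s)
    = s + (pvI (decide (r+3 < board.length) && decide (c+3 < (board.getD 0 ([] : List String)).length) && pvDR board piece r c)
         + pvI (decide (r+3 < board.length) && decide (3 ≤ c) && pvDL board piece r c)) := by
  generalize hL : (board.getD 0 ([] : List String)).length = L
  generalize hRn : board.length = R
  have er1 : ((r : Int) + 1) = ((r+1 : Nat) : Int) := by push_cast; ring
  have er2 : ((r : Int) + 2) = ((r+2 : Nat) : Int) := by push_cast; ring
  have er3 : ((r : Int) + 3) = ((r+3 : Nat) : Int) := by push_cast; ring
  have ec1 : ((c : Int) + 1) = ((c+1 : Nat) : Int) := by push_cast; ring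
  have ec2 : ((c : Int) + 2) = ((c+2 : Nat) : Int) := by push_cast; ring
  have ec3 : ((c : Int) + 3) = ((c+3 : Nat) : Int) := by push_cast; ring
  have hcast : ∀ (a b : Nat), pvCellA board (a : Int) (b : Int) = pvCell board a b := by
    intro a b; simp [pvCellA, pvCell]
  have hR : (((r+3 : Nat) : Int) < ((R : Nat) : Int)) ↔ (r + 3 < R) := by omega
  have hC : (((c+3 : Nat) : Int) < ((L : Nat) : Int)) ↔ (c + 3 < L) := by omega
  by_cases h3 : 3 ≤ c
  · have fc1 : ((c : Int) - 1) = ((c-1 : Nat) : Int) := by omega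
    have fc2 : ((c : Int) - 2) = ((c-2 : Nat) : Int) := by omega
    have hD : ((((c-3 : Nat)) : Int) ≥ 0) ↔ (3 ≤ c) := by omega
    have fc3 : ((c : Int) - 3) = ((c-3 : Nat) : Int) := by omega
    rw [er1, er2, er3, ec1, ec2, ec3, fc1, fc2, fc3]
    simp only [hcast, hR, hC, hD]
    split_ifs with h1 h2 h4 <;>
      simp [pvI, pvDR, pvDL, List.getD_eq_getElem?_getD, h3, h1, *] <;> first | omega | tauto | (split_ifs <;> first | omega | tauto)
  · have hD : ¬ ((c : Int) - 3 ≥ 0) := by omega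
    rw [er1, er2, er3, ec1, ec2, ec3]
    simp only [hcast, hR, hC]
    have hb2 : (decide (r+3 < R) && decide (3 ≤ c) && pvDL board piece r c) = false := by
      simp [h3]
    rw [hb2]
    have hno : ¬ (((r : Int) + 3 < (board.length : Int) ∧ (c : Int) - 3 ≥ 0) ∧
        pvCellA board ((r : Int)+1) ((c : Int)-1) = piece ∧ pvCellA board ((r : Int)+2) ((c : Int)-2) = piece ∧
        pvCellA board ((r : Int)+3) ((c : Int)-3) = "") := fun h => hD h.1.2
    split_ifs with h1 h2 <;> simp [pvI, pvDR, pvDL, List.getD_eq_getElem?_getD, h3, *] <;> first | omega | tauto | (split_ifs <;> first | omega | tauto)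

-- A as a double sum of indicators
theorem pvA_sum (board : List (List String)) (piece : String) :
    connected_threes_diagonal board piece =
      ((List.range board.length).map (fun r =>
        ((List.range (board.getD 0 ([] : List String)).length).map (fun c =>
            pvI (decide (r+3 < board.length) && decide (c+3 < (board.getD 0 ([] : List String)).length) && pvDR board piece r c))).sum
        + ((List.range (board.getD 0 ([] : List String)).length).map (fun c =>
            pvI (decide (r+3 < board.length) && decide (3 ≤ c) && pvDL board piece r c))).sum)).sum := by
  simp only [connected_threes_diagonal, PySem.List.pyGetD_zero]
  rw [PySem.List.pyRange_zero_nat]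
  simp only [PySem.List.pyRange_zero_nat, List.foldl_map]
  refine (pv_foldl_body_sum _ _ _ 0 ?_).trans (zero_add _)
  intro s r
  have h1 := pv_foldl_body_sum (List.range (board.getD 0 ([] : List String)).length) _ _ s
    (fun s' c => pvA_cell board piece r c s')
  rw [PySem.List.sum_map_add_int] at h1
  exact h1

-- diagonal-line geometry: the k-th diagonal line runs over rows [pvLo, pvHi)
def pvLo (Cn k : Nat) : Nat := k + 1 - Cn
def pvHi (Rn k : Nat) : Nat := min Rn (k + 1)
def pvLen (Rn Cn k : Nat) : Nat := pvHi Rn k - pvLo Cn k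

-- list-sum over a range IS a Finset sum; countP over a range IS a filter card
theorem pv_list_sum_finset (n : Nat) (f : Nat → Int) :
    ((List.range n).map f).sum = ∑ i ∈ Finset.range n, f i := rfl

theorem pv_countP_card (n : Nat) (p : Nat → Bool) :
    (List.range n).countP p = ((Finset.range n).filter (fun x => p x = true)).card := by
  simp [Finset.filter, Finset.range, Multiset.range, Multiset.filter_coe, List.countP_eq_length_filter]

-- a 4-window of a list, spelled out
theorem pv_window4 {α : Type} (L : List α) (d : α) (i : Nat) (h : i + 4 ≤ L.length) :
    (L.drop i).take 4 = [L.getD i d, L.getD (i+1) d, L.getD (i+2) d, L.getD (i+3) d] := by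
  rw [List.drop_eq_getElem_cons (by omega), List.drop_eq_getElem_cons (by omega),
      List.drop_eq_getElem_cons (by omega), List.drop_eq_getElem_cons (by omega),
      List.getD_eq_getElem L d (by omega), List.getD_eq_getElem L d (by omega),
      List.getD_eq_getElem L d (by omega), List.getD_eq_getElem L d (by omega)]
  rfl

theorem pv_getD_map_range {α : Type} (f : Nat → α) (n i : Nat) (d : α) (h : i < n) :
    (((List.range n).map f).getD i d) = f i := by
  rw [List.getD_eq_getElem _ _ (by simpa using h)]
  simp

-- pvSeqCount as a window count
theorem pvSeqCount_eq (target seq : List String) (score : Int) :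
    pvSeqCount target seq score = score +
      (((List.range (seq.length - 3)).countP
        (fun i : Nat => decide (PySem.List.slice seq (some (i : Int)) (some ((i : Int) + 4)) = target))) : Int) := by
  unfold pvSeqCount
  rw [PySem.List.pyRange_one]
  have hN : (((seq.length : Int) - 3) - 0).toNat = seq.length - 3 := by omega
  rw [hN, List.foldl_map]
  simp only [zero_add]
  exact PySem.List.foldl_ite_add_one (fun i : Nat => PySem.List.slice seq (some (i : Int)) (some ((i : Int) + 4)) = target) _ _

-- B as a sum over diagonal keys k of two window counts
theorem pv_cellA_cast (board : List (List String)) (a b : Nat) :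
    pvCellA board (a : Int) (b : Int) = pvCell board a b := by
  simp [pvCellA, pvCell]

theorem pvB_sum (h0 : List String) (t : List (List String)) (piece : String) :
    connected_threes_diagonal_alt (h0 :: t) piece =
      ((List.range ((h0 :: t).length + h0.length - 1)).map (fun k =>
        (((List.range (pvLen (h0 :: t).length h0.length k - 3)).countP (fun i =>
            pvDR (h0 :: t) piece (pvLo h0.length k + i) (pvLo h0.length k + i + h0.length - 1 - k))) : Int)
      + (((List.range (pvLen (h0 :: t).length h0.length k - 3)).countP (fun i =>
            pvDL (h0 :: t) piece (pvLo h0.length k + i) (k - (pvLo h0.length k + i)))) : Int))).sum := by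
  have hb : (h0 :: t).length = t.length + 1 := rfl
  simp only [connected_threes_diagonal_alt]
  rw [PySem.List.pyRange_one]
  have hN : ((((h0 :: t).length : Int) + (h0.length : Int) - 1) - 0).toNat
      = (h0 :: t).length + h0.length - 1 := by omega
  rw [hN, List.foldl_map]
  refine (pv_foldl_body_sum _ _ _ 0 ?_).trans (zero_add _)
  intro s k
  simp only [List.foldl, zero_add]
  rw [pvSeqCount_eq, pvSeqCount_eq]
  have hline : PySem.List.pyRange (max ((k:Int) - (h0.length:Int) + 1) 0) (min (((h0::t).length:Int)) ((k:Int) + 1))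
      = (List.range (pvLen (h0::t).length h0.length k)).map (fun j => ((pvLo h0.length k + j : Nat) : Int)) := by
    rw [PySem.List.pyRange_one]
    have h1 : (min (((h0::t).length:Int)) ((k:Int) + 1) - max ((k:Int) - (h0.length:Int) + 1) 0).toNat
        = pvLen (h0::t).length h0.length k := by unfold pvLen pvHi pvLo; omega
    rw [h1]
    refine List.map_congr_left ?_
    intro j _
    have h2 : max ((k:Int) - (h0.length:Int) + 1) 0 = ((pvLo h0.length k : Nat) : Int) := by
      unfold pvLo; omega
    rw [h2]; push_cast; ring
  rw [hline, List.map_map, List.map_map]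
  simp only [List.length_map, List.length_range, Function.comp_def]
  rw [add_assoc]
  congr 1
  congr 1
  · refine congrArg Nat.cast (List.countP_congr ?_)
    intro i hi
    have hi' : i + 4 ≤ pvLen (h0::t).length h0.length k := by
      have := List.mem_range.mp hi; omega
    simp only [Function.comp_def, decide_eq_true_eq]
    have hL : ((List.range (pvLen (h0::t).length h0.length k)).map
        (fun j => pvCellA (h0::t) ((pvLo h0.length k + j : Nat) : Int)
          (((pvLo h0.length k + j : Nat) : Int) - (k:Int) + (h0.length:Int) - 1))).length
        = pvLen (h0::t).length h0.length k := by simp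
    have hsl : PySem.List.slice ((List.range (pvLen (h0::t).length h0.length k)).map
        (fun j => pvCellA (h0::t) ((pvLo h0.length k + j : Nat) : Int)
          (((pvLo h0.length k + j : Nat) : Int) - (k:Int) + (h0.length:Int) - 1)))
        (some (i : Int)) (some ((i : Int) + 4))
        = [pvCellA (h0::t) ((pvLo h0.length k + i : Nat) : Int) (((pvLo h0.length k + i : Nat) : Int) - (k:Int) + (h0.length:Int) - 1),
           pvCellA (h0::t) ((pvLo h0.length k + (i+1) : Nat) : Int) (((pvLo h0.length k + (i+1) : Nat) : Int) - (k:Int) + (h0.length:Int) - 1),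
           pvCellA (h0::t) ((pvLo h0.length k + (i+2) : Nat) : Int) (((pvLo h0.length k + (i+2) : Nat) : Int) - (k:Int) + (h0.length:Int) - 1),
           pvCellA (h0::t) ((pvLo h0.length k + (i+3) : Nat) : Int) (((pvLo h0.length k + (i+3) : Nat) : Int) - (k:Int) + (h0.length:Int) - 1)] := by
      rw [PySem.List.slice_toNat _ (by omega) (by omega)]
      have h4 : ((i : Int) + 4).toNat = i + 4 := by omega
      have h5 : ((i : Int)).toNat = i := by omega
      rw [h4, h5]
      have h6 : i + 4 - i = 4 := by omega
      rw [h6, pv_window4 _ "" i (by rw [hL]; exact hi'),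
          pv_getD_map_range _ _ _ _ (by omega), pv_getD_map_range _ _ _ _ (by omega),
          pv_getD_map_range _ _ _ _ (by omega), pv_getD_map_range _ _ _ _ (by omega)]
    rw [hsl]
    have hrow : ∀ j : Nat, pvCellA (h0::t) ((pvLo h0.length k + j : Nat) : Int)
        (((pvLo h0.length k + j : Nat) : Int) - (k:Int) + (h0.length:Int) - 1)
        = pvCell (h0::t) (pvLo h0.length k + j) (pvLo h0.length k + j + h0.length - 1 - k) := by
      intro j
      have hcol : ((pvLo h0.length k + j : Nat) : Int) - (k:Int) + (h0.length:Int) - 1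
          = ((pvLo h0.length k + j + h0.length - 1 - k : Nat) : Int) := by unfold pvLo; omega
      rw [hcol, pv_cellA_cast]
    rw [hrow, hrow, hrow, hrow]
    have g1 : pvLo h0.length k + i + 1 + h0.length - 1 - k = pvLo h0.length k + i + h0.length - 1 - k + 1 := by unfold pvLo; omega
    have g2 : pvLo h0.length k + i + 2 + h0.length - 1 - k = pvLo h0.length k + i + h0.length - 1 - k + 2 := by unfold pvLo; omega
    have g3 : pvLo h0.length k + i + 3 + h0.length - 1 - k = pvLo h0.length k + i + h0.length - 1 - k + 3 := by unfold pvLo; omega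
    rw [show pvLo h0.length k + (i+1) = pvLo h0.length k + i + 1 from by omega,
        show pvLo h0.length k + (i+2) = pvLo h0.length k + i + 2 from by omega,
        show pvLo h0.length k + (i+3) = pvLo h0.length k + i + 3 from by omega,
        g1, g2, g3]
    simp only [pvDR, List.cons.injEq, and_true, Bool.and_eq_true, decide_eq_true_eq]
    tauto
  · refine congrArg Nat.cast (List.countP_congr ?_)
    intro i hi
    have hi' : i + 4 ≤ pvLen (h0::t).length h0.length k := by
      have := List.mem_range.mp hi; omega
    simp only [decide_eq_true_eq]
    have hL : ((List.range (pvLen (h0::t).length h0.length k)).map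
        (fun j => pvCellA (h0::t) ((pvLo h0.length k + j : Nat) : Int)
          ((k:Int) - ((pvLo h0.length k + j : Nat) : Int)))).length
        = pvLen (h0::t).length h0.length k := by simp
    have hsl : PySem.List.slice ((List.range (pvLen (h0::t).length h0.length k)).map
        (fun j => pvCellA (h0::t) ((pvLo h0.length k + j : Nat) : Int)
          ((k:Int) - ((pvLo h0.length k + j : Nat) : Int))))
        (some (i : Int)) (some ((i : Int) + 4))
        = [pvCellA (h0::t) ((pvLo h0.length k + i : Nat) : Int) ((k:Int) - ((pvLo h0.length k + i : Nat) : Int)),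
           pvCellA (h0::t) ((pvLo h0.length k + (i+1) : Nat) : Int) ((k:Int) - ((pvLo h0.length k + (i+1) : Nat) : Int)),
           pvCellA (h0::t) ((pvLo h0.length k + (i+2) : Nat) : Int) ((k:Int) - ((pvLo h0.length k + (i+2) : Nat) : Int)),
           pvCellA (h0::t) ((pvLo h0.length k + (i+3) : Nat) : Int) ((k:Int) - ((pvLo h0.length k + (i+3) : Nat) : Int))] := by
      rw [PySem.List.slice_toNat _ (by omega) (by omega)]
      have h4 : ((i : Int) + 4).toNat = i + 4 := by omega
      have h5 : ((i : Int)).toNat = i := by omega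
      rw [h4, h5]
      have h6 : i + 4 - i = 4 := by omega
      rw [h6, pv_window4 _ "" i (by rw [hL]; exact hi'),
          pv_getD_map_range _ _ _ _ (by omega), pv_getD_map_range _ _ _ _ (by omega),
          pv_getD_map_range _ _ _ _ (by omega), pv_getD_map_range _ _ _ _ (by omega)]
    rw [hsl]
    have hrk : pvLo h0.length k + i + 3 ≤ k := by
      have h := hi'; unfold pvLen pvHi at h; unfold pvLo at h ⊢; omega
    have hrow : ∀ j : Nat, j ≤ 3 → pvCellA (h0::t) ((pvLo h0.length k + (i+j) : Nat) : Int)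
        ((k:Int) - ((pvLo h0.length k + (i+j) : Nat) : Int))
        = pvCell (h0::t) (pvLo h0.length k + (i+j)) (k - (pvLo h0.length k + (i+j))) := by
      intro j hj
      have hcol : (k:Int) - ((pvLo h0.length k + (i+j) : Nat) : Int)
          = ((k - (pvLo h0.length k + (i+j)) : Nat) : Int) := by omega
      rw [hcol, pv_cellA_cast]
    have hz : pvLo h0.length k + i = pvLo h0.length k + (i+0) := by omega
    rw [hz, hrow 0 (by omega), hrow 1 (by omega), hrow 2 (by omega), hrow 3 (by omega)]
    have f1 : k - (pvLo h0.length k + (i+0) + 1) = k - (pvLo h0.length k + (i+0)) - 1 := by omega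
    have f2 : k - (pvLo h0.length k + (i+0) + 2) = k - (pvLo h0.length k + (i+0)) - 2 := by omega
    have f3 : k - (pvLo h0.length k + (i+0) + 3) = k - (pvLo h0.length k + (i+0)) - 3 := by omega
    rw [show pvLo h0.length k + (i+1) = pvLo h0.length k + (i+0) + 1 from by omega,
        show pvLo h0.length k + (i+2) = pvLo h0.length k + (i+0) + 2 from by omega,
        show pvLo h0.length k + (i+3) = pvLo h0.length k + (i+0) + 3 from by omega,
        f1, f2, f3]
    simp only [pvDL, List.cons.injEq, and_true, Bool.and_eq_true, decide_eq_true_eq]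
    tauto

-- reindexing: windows on down-right diagonal lines ↔ guarded cells of the grid
theorem pv_reindex_DR (f : Nat → Nat → Bool) (Rn Cn : Nat) :
    (∑ k ∈ Finset.range (Rn + Cn - 1),
      ((Finset.range (pvLen Rn Cn k - 3)).filter
        (fun i => f (pvLo Cn k + i) (pvLo Cn k + i + Cn - 1 - k) = true)).card)
    = ∑ r ∈ Finset.range Rn,
      ((Finset.range Cn).filter
        (fun c => (decide (r+3 < Rn) && decide (c+3 < Cn) && f r c) = true)).card := by
  rw [← Finset.card_sigma, ← Finset.card_sigma]
  apply Finset.card_nbij'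
    (i := fun x => ⟨pvLo Cn x.1 + x.2, pvLo Cn x.1 + x.2 + Cn - 1 - x.1⟩)
    (j := fun y => ⟨y.1 + Cn - 1 - y.2, y.1 - pvLo Cn (y.1 + Cn - 1 - y.2)⟩)
  · rintro ⟨k, i⟩ hx
    simp only [Finset.coe_sigma, Set.mem_sigma_iff, Finset.mem_coe, Finset.mem_range,
      Finset.mem_filter, Bool.and_eq_true, decide_eq_true_eq] at hx ⊢
    obtain ⟨hk, hi, hf⟩ := hx
    have hlo : pvLo Cn k = k + 1 - Cn := rfl
    have hlen : pvLen Rn Cn k = min Rn (k + 1) - pvLo Cn k := rfl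
    exact ⟨by omega, ⟨by omega, ⟨⟨by omega, by omega⟩, hf⟩⟩⟩
  · rintro ⟨r, c⟩ hy
    simp only [Finset.coe_sigma, Set.mem_sigma_iff, Finset.mem_coe, Finset.mem_range,
      Finset.mem_filter, Bool.and_eq_true, decide_eq_true_eq] at hy ⊢
    obtain ⟨hr, hc, ⟨hg1, hg2⟩, hf⟩ := hy
    have hA : pvLo Cn (r + Cn - 1 - c) = r - c := by unfold pvLo; omega
    have hB : pvLen Rn Cn (r + Cn - 1 - c) = min Rn (r + Cn - c) - (r - c) := by
      unfold pvLen pvHi; rw [hA]; congr 1; omega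
    rw [hA, hB]
    refine ⟨by omega, by omega, ?_⟩
    have e1 : r - c + (r - (r - c)) = r := by omega
    rw [e1]
    have e2 : r + Cn - 1 - (r + Cn - 1 - c) = c := by omega
    rw [e2]
    exact hf
  · rintro ⟨k, i⟩ hx
    simp only [Finset.coe_sigma, Set.mem_sigma_iff, Finset.mem_coe, Finset.mem_range,
      Finset.mem_filter] at hx
    obtain ⟨hk, hi, hf⟩ := hx
    have hlo : pvLo Cn k = k + 1 - Cn := rfl
    have hlen : pvLen Rn Cn k = min Rn (k + 1) - pvLo Cn k := rfl
    simp only [Sigma.mk.injEq]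
    have ek : pvLo Cn k + i + Cn - 1 - (pvLo Cn k + i + Cn - 1 - k) = k := by omega
    rw [ek]
    exact ⟨rfl, heq_of_eq (by omega)⟩
  · rintro ⟨r, c⟩ hy
    simp only [Finset.coe_sigma, Set.mem_sigma_iff, Finset.mem_coe, Finset.mem_range,
      Finset.mem_filter, Bool.and_eq_true, decide_eq_true_eq] at hy
    obtain ⟨hr, hc, ⟨hg1, hg2⟩, hf⟩ := hy
    have hA : pvLo Cn (r + Cn - 1 - c) = r - c := by unfold pvLo; omega
    simp only [Sigma.mk.injEq, hA]
    exact ⟨by omega, heq_of_eq (by omega)⟩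

-- reindexing: windows on anti-diagonal lines ↔ guarded cells of the grid
theorem pv_reindex_DL (f : Nat → Nat → Bool) (Rn Cn : Nat) :
    (∑ k ∈ Finset.range (Rn + Cn - 1),
      ((Finset.range (pvLen Rn Cn k - 3)).filter
        (fun i => f (pvLo Cn k + i) (k - (pvLo Cn k + i)) = true)).card)
    = ∑ r ∈ Finset.range Rn,
      ((Finset.range Cn).filter
        (fun c => (decide (r+3 < Rn) && decide (3 ≤ c) && f r c) = true)).card := by
  rw [← Finset.card_sigma, ← Finset.card_sigma]
  apply Finset.card_nbij'
    (i := fun x => ⟨pvLo Cn x.1 + x.2, x.1 - (pvLo Cn x.1 + x.2)⟩)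
    (j := fun y => ⟨y.1 + y.2, y.1 - pvLo Cn (y.1 + y.2)⟩)
  · rintro ⟨k, i⟩ hx
    simp only [Finset.coe_sigma, Set.mem_sigma_iff, Finset.mem_coe, Finset.mem_range,
      Finset.mem_filter, Bool.and_eq_true, decide_eq_true_eq] at hx ⊢
    obtain ⟨hk, hi, hf⟩ := hx
    have hlo : pvLo Cn k = k + 1 - Cn := rfl
    have hlen : pvLen Rn Cn k = min Rn (k + 1) - pvLo Cn k := rfl
    exact ⟨by omega, ⟨by omega, ⟨⟨by omega, by omega⟩, hf⟩⟩⟩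
  · rintro ⟨r, c⟩ hy
    simp only [Finset.coe_sigma, Set.mem_sigma_iff, Finset.mem_coe, Finset.mem_range,
      Finset.mem_filter, Bool.and_eq_true, decide_eq_true_eq] at hy ⊢
    obtain ⟨hr, hc, ⟨hg1, hg2⟩, hf⟩ := hy
    have hA : pvLo Cn (r + c) = r + c + 1 - Cn := rfl
    have hB : pvLen Rn Cn (r + c) = min Rn (r + c + 1) - pvLo Cn (r + c) := rfl
    refine ⟨by omega, by omega, ?_⟩
    have e1 : pvLo Cn (r + c) + (r - pvLo Cn (r + c)) = r := by omega
    rw [e1]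
    have e2 : r + c - r = c := by omega
    rw [e2]
    exact hf
  · rintro ⟨k, i⟩ hx
    simp only [Finset.coe_sigma, Set.mem_sigma_iff, Finset.mem_coe, Finset.mem_range,
      Finset.mem_filter] at hx
    obtain ⟨hk, hi, hf⟩ := hx
    have hlo : pvLo Cn k = k + 1 - Cn := rfl
    have hlen : pvLen Rn Cn k = min Rn (k + 1) - pvLo Cn k := rfl
    simp only [Sigma.mk.injEq]
    have ek : pvLo Cn k + i + (k - (pvLo Cn k + i)) = k := by omega
    rw [ek]
    exact ⟨rfl, heq_of_eq (by omega)⟩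
  · rintro ⟨r, c⟩ hy
    simp only [Finset.coe_sigma, Set.mem_sigma_iff, Finset.mem_coe, Finset.mem_range,
      Finset.mem_filter, Bool.and_eq_true, decide_eq_true_eq] at hy
    obtain ⟨hr, hc, ⟨hg1, hg2⟩, hf⟩ := hy
    have hA : pvLo Cn (r + c) = r + c + 1 - Cn := rfl
    simp only [Sigma.mk.injEq]
    exact ⟨by omega, heq_of_eq (by omega)⟩

-- ===== VERDICT (by name: the statement is the Claim_ definition above) =====
theorem connected_threes_diagonal_spec : Claim_equal_connected_threes_diagonal := by
  intro board piece _ _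
  unfold Spec_connected_threes_diagonal
  cases board with
  | nil => rfl
  | cons h0 t =>
    rw [pvA_sum, pvB_sum]
    have hget : ((h0 :: t).getD 0 ([] : List String)) = h0 := rfl
    simp only [hget]
    rw [pv_list_sum_finset, pv_list_sum_finset]
    have eA : ∀ r : Nat,
        (((List.range h0.length).map (fun c =>
          pvI (decide (r+3 < (h0::t).length) && decide (c+3 < h0.length) && pvDR (h0::t) piece r c))).sum
        + ((List.range h0.length).map (fun c =>
          pvI (decide (r+3 < (h0::t).length) && decide (3 ≤ c) && pvDL (h0::t) piece r c))).sum)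
        = ((((Finset.range h0.length).filter (fun c =>
            (decide (r+3 < (h0::t).length) && decide (c+3 < h0.length) && pvDR (h0::t) piece r c) = true)).card : Int)
          + (((Finset.range h0.length).filter (fun c =>
            (decide (r+3 < (h0::t).length) && decide (3 ≤ c) && pvDL (h0::t) piece r c) = true)).card : Int)) := by
      intro r
      congr 1 <;>
        · simp only [pvI]
          rw [PySem.List.sum_map_ite_one_zero, pv_countP_card]
    have eB : ∀ k : Nat,
        ((((List.range (pvLen (h0::t).length h0.length k - 3)).countP (fun i =>
            pvDR (h0::t) piece (pvLo h0.length k + i) (pvLo h0.length k + i + h0.length - 1 - k))) : Int)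
        + (((List.range (pvLen (h0::t).length h0.length k - 3)).countP (fun i =>
            pvDL (h0::t) piece (pvLo h0.length k + i) (k - (pvLo h0.length k + i)))) : Int))
        = ((((Finset.range (pvLen (h0::t).length h0.length k - 3)).filter (fun i =>
            pvDR (h0::t) piece (pvLo h0.length k + i) (pvLo h0.length k + i + h0.length - 1 - k) = true)).card : Int)
          + (((Finset.range (pvLen (h0::t).length h0.length k - 3)).filter (fun i =>
            pvDL (h0::t) piece (pvLo h0.length k + i) (k - (pvLo h0.length k + i)) = true)).card : Int)) := by
      intro k
      rw [pv_countP_card, pv_countP_card]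
    simp only [eA, eB]
    rw [Finset.sum_add_distrib, Finset.sum_add_distrib, ← Nat.cast_sum, ← Nat.cast_sum,
        ← Nat.cast_sum, ← Nat.cast_sum,
        pv_reindex_DR (fun r c => pvDR (h0::t) piece r c) (h0::t).length h0.length,
        pv_reindex_DL (fun r c => pvDL (h0::t) piece r c) (h0::t).length h0.length]
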